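-- pv_equiv track=rewrite | github.com/sajjadium/ctf-archives | ctfs/BroncoCTF/2024/rev/Serpents_Pass/SerpentsServer.py | gate2
-- ===== SOURCE A (Python) =====
-- def gate2(guess: int) -> bool:
--     if guess > 20:
--         return False
--     binString = '0'
--     for _ in range(0, guess):
--         binString += '1'
--     binary = int(binString, 2)
--     return chr(binary) == '?'
-- ===== SOURCE B (Python) =====
-- def gate2(guess: int) -> bool:
--     if guess > 20:
--         return False
--     binary = (1 << guess) - 1 if guess > 0 else 0
--     return binary == 63
-- ===== Notes on version B (the rewrite author's own statement) =====
-- stated objective: simpler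
-- what changed: Replaces the string-building loop ('0'+'1'*guess) and the base-2 parse with the closed-form value 2^guess - 1 it computes (0 for non-positive guess), compared directly against 63 = ord('?').
import Mathlib
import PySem

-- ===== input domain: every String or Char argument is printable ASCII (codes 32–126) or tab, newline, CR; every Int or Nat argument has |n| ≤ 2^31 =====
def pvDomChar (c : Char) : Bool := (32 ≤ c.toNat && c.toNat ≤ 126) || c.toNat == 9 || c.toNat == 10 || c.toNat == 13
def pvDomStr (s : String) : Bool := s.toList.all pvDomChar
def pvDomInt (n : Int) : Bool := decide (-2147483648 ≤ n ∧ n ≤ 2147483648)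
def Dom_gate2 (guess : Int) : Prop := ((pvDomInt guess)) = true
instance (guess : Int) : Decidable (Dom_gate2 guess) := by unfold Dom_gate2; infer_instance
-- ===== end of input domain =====

-- ===== PORT A =====
-- B replaces the '0'+'1'*guess construction + int(_,2) parse with the closed form 2^guess-1; return value only.
-- int(binString, 2): the parse never fails here (binString is '0' followed by '1's), so getD 0 is exact.
-- chr(binary) == '?': binary is always in chr's range (0 ≤ binary < 2^20), and chr n == '?' exactly when n = 63.
def gate2 (guess : Int) : Bool :=
  if guess > 20 then false
  else
    let binString := (PySem.List.pyRange 0 guess 1).foldl (fun s _ => s ++ "1") "0"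
    let binary := (PySem.Int.ofStrBase? binString 2).getD 0
    decide (binary = 63)

-- ===== PORT B =====
def gate2_alt (guess : Int) : Bool :=
  if guess > 20 then false
  else
    let binary : Int := if guess > 0 then 2 ^ guess.toNat - 1 else 0
    decide (binary = 63)

-- ===== PRECONDITION & SPEC =====
def Spec_gate2 (guess : Int) (out : Bool) : Prop := out = gate2_alt guess
instance (guess : Int) (out : Bool) : Decidable (Spec_gate2 guess out) := by unfold Spec_gate2; infer_instance

-- ===== CLAIM (what is proved, stated in full; the proofs are below) =====
def Claim_equal_gate2 : Prop := ∀ (guess : Int), Dom_gate2 guess → Spec_gate2 guess (gate2 guess)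

-- ===== LEMMAS AND PROOFS =====

-- ===== VERDICT (by name: the statement is the Claim_ definition above) =====
theorem gate2_spec : Claim_equal_gate2 := by
  intro guess _
  unfold Spec_gate2 gate2 gate2_alt
  by_cases h20 : guess > 20
  · simp [h20]
  · by_cases hpos : guess > 0
    · have h1 : 1 ≤ guess := hpos
      have h2 : guess ≤ 20 := by omega
      interval_cases guess <;> decide
    · have hle : guess ≤ 0 := by omega
      rw [PySem.List.pyRange_one_eq_nil hle]
      simp [h20, hpos]
      decide
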